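-- pv_equiv track=rewrite | github.com/vanitaar/python-code-challenges | dictionaries.py | count_same_last_name_initial
-- ===== SOURCE A (Python) =====
-- def count_same_last_name_initial(names):
--     initials = {}
--     for last_name in names:
--         initial_letter = last_name[0]
--         if initial_letter not in initials:
--             initials[initial_letter] = 0
--         initials[initial_letter] += len(names[last_name])
--     return initials
-- ===== SOURCE B (Python) =====
-- def count_same_last_name_initial(names):
--     keys = list(names)
--     order = list(dict.fromkeys(k[0] for k in keys))
--     return {c: sum(len(names[k]) for k in keys if k[0] == c) for c in order}
-- ===== Notes on version B (the rewrite author's own statement) =====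
-- stated objective: alternative
-- what changed: Replaces the incremental dict-bucket accumulation with a two-phase plan: first deduplicate the initials in first-occurrence order (dict.fromkeys), then build the result with one comprehension that sums len(names[k]) over the keys sharing each initial.
import Mathlib
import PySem

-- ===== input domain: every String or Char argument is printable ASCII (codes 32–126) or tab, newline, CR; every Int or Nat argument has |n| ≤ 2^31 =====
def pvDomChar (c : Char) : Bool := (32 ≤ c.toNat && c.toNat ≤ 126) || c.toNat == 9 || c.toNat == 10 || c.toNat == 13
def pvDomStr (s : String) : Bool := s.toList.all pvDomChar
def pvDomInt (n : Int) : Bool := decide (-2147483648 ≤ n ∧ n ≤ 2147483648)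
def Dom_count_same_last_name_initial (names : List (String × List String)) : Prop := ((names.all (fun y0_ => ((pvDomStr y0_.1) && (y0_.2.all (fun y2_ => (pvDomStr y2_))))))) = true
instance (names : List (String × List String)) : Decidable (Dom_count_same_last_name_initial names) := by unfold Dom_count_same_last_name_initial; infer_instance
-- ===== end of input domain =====

-- B replaces A's incremental dict-bucket accumulation by a two-phase plan (dedup the
-- initials in first-occurrence order, then one sum per distinct initial); alternative
-- decomposition, same results.

-- ===== PORT A =====
-- last_name[0] as a one-character string; the none branch is the IndexError case, excluded by Pre_
def pvInitial (k : String) : String :=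
  match PySem.Str.pyGet? k 0 with
  | some c => String.ofList [c]
  | none => ""

def count_same_last_name_initial (names : List (String × List String)) : List (String × Int) :=
  ((names.map Prod.fst).foldl (fun initials last_name =>
      let c := pvInitial last_name
      let initials' := if initials.contains c then initials else initials.insert c (0 : Int)
      initials'.insert c (initials'.getD c 0 + (((PySem.Dict.mk names).getD last_name []).length : Int)))
    PySem.Dict.empty).items

-- ===== PORT B =====
def count_same_last_name_initial_alt (names : List (String × List String)) : List (String × Int) :=
  let keys := names.map Prod.fst
  let order := PySem.List.dedup (keys.map pvInitial)
  order.map (fun c => (c,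
    ((keys.filter (fun k => pvInitial k == c)).map
      (fun k => (((PySem.Dict.mk names).getD k []).length : Int))).sum))

-- ===== PRECONDITION & SPEC =====
-- Pre_ excludes inputs having a zero-length last-name key: there `last_name[0]` raises IndexError in A (and likewise in B).
def Pre_count_same_last_name_initial (names : List (String × List String)) : Prop :=
  ∀ p ∈ names, p.1 ≠ ""
instance (names : List (String × List String)) : Decidable (Pre_count_same_last_name_initial names) := by unfold Pre_count_same_last_name_initial; infer_instance

def pvWitness_count_same_last_name_initial : (List (String × List String)) :=
  [("Smith", ["John", "Jane"]), ("Santos", ["Ana"]), ("Doe", ["Sam"])]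

def Spec_count_same_last_name_initial (names : List (String × List String)) (out : List (String × Int)) : Prop := out = count_same_last_name_initial_alt names
instance (names : List (String × List String)) (out : List (String × Int)) : Decidable (Spec_count_same_last_name_initial names out) := by unfold Spec_count_same_last_name_initial; infer_instance

-- ===== CLAIM (what is proved, stated in full; the proofs are below) =====
def Claim_equal_count_same_last_name_initial : Prop := ∀ (names : List (String × List String)), Dom_count_same_last_name_initial names → Pre_count_same_last_name_initial names → Spec_count_same_last_name_initial names (count_same_last_name_initial names)

-- ===== LEMMAS AND PROOFS =====

lemma pv_dedup_concat (xs : List String) (x : String) :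
    PySem.List.dedup (xs ++ [x])
      = if x ∈ xs then PySem.List.dedup xs else PySem.List.dedup xs ++ [x] := by
  simp only [PySem.List.dedup_eq_ofList, PySem.Set.ofList_append, PySem.Set.update_cons,
    PySem.Set.update_nil, PySem.Set.add, PySem.Set.contains_eq_listContains,
    List.contains_eq_mem, PySem.Set.mem_ofList, decide_eq_true_eq]

-- the canonical value of the accumulating dict after processing the key list ks
def pvTable (init : String → String) (w : String → Int) (ks : List String) :
    List (String × Int) :=
  (PySem.List.dedup (ks.map init)).map
    (fun c => (c, ((ks.filter (fun k => init k == c)).map w).sum))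

lemma pv_fold_eq (init : String → String) (w : String → Int) (ks : List String) :
    ks.foldl (fun d k =>
        let c := init k
        let d' := if d.contains c then d else d.insert c (0 : Int)
        d'.insert c (d'.getD c 0 + w k)) PySem.Dict.empty
      = PySem.Dict.mk (pvTable init w ks) := by
  induction ks using List.reverseRecOn with
  | nil => rfl
  | append_singleton ks x IH =>
    rw [List.foldl_append, List.foldl_cons, List.foldl_nil, IH]
    set S := PySem.List.dedup (ks.map init) with hS
    have hkeys : (PySem.Dict.mk (pvTable init w ks)).keys = S := by
      simp only [PySem.Dict.keys, pvTable, List.map_map]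
      simp [Function.comp_def, hS]
    by_cases hx : init x ∈ ks.map init
    · -- existing bucket: insert overwrites in place
      have hmemS : init x ∈ S := (PySem.List.mem_dedup _ _).mpr hx
      have hcont : (PySem.Dict.mk (pvTable init w ks)).contains (init x) = true := by
        rw [PySem.Dict.contains_eq_decide_mem_keys, hkeys]
        simpa using hmemS
      have hnd : (PySem.Dict.mk (pvTable init w ks)).keys.Nodup := by
        rw [hkeys]; exact PySem.List.nodup_dedup _
      have hval : (PySem.Dict.mk (pvTable init w ks)).getD (init x) 0
          = ((ks.filter (fun k => init k == init x)).map w).sum := by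
        apply PySem.Dict.getD_of_mem_items
        · exact List.mem_map_of_mem hmemS
        · exact hnd
      apply PySem.Dict.ext
      simp only [hcont, if_true]
      rw [PySem.Dict.items_insert_of_contains _ _ hcont, hval]
      show (pvTable init w ks).map _ = pvTable init w (ks ++ [x])
      unfold pvTable
      rw [List.map_append, List.map_cons, List.map_nil, pv_dedup_concat, if_pos hx, List.map_map]
      apply List.map_congr_left
      intro a hamem
      by_cases ha : a = init x
      · subst ha
        simp [List.filter_append]
      · have hne : (a == init x) = false := by simpa using ha
        have hne' : (init x == a) = false := by simpa using fun h => ha h.symm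
        simp [hne', List.filter_append, ha]
    · -- fresh bucket: value starts at 0, entry is appended
      have hmemS : init x ∉ S := fun h => hx ((PySem.List.mem_dedup _ _).mp h)
      have hcont : (PySem.Dict.mk (pvTable init w ks)).contains (init x) = false := by
        rw [PySem.Dict.contains_eq_decide_mem_keys, hkeys]
        simpa using hmemS
      apply PySem.Dict.ext
      simp only [hcont, Bool.false_eq_true, if_false]
      rw [PySem.Dict.getD_insert_self, PySem.Dict.insert_insert_self,
        PySem.Dict.items_insert_of_not_contains _ _ hcont]
      show pvTable init w ks ++ [(init x, 0 + w x)] = pvTable init w (ks ++ [x])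
      unfold pvTable
      rw [List.map_append, List.map_cons, List.map_nil, pv_dedup_concat, if_neg hx, List.map_append]
      congr 1
      · apply List.map_congr_left
        intro a hamem
        have hane : (init x == a) = false := by
          simp only [beq_eq_false_iff_ne, ne_eq]
          intro h
          apply hx
          rw [h]
          exact (PySem.List.mem_dedup _ _).mp hamem
        have hfa : List.filter (fun k => init k == a) (ks ++ [x])
            = List.filter (fun k => init k == a) ks := by
          rw [List.filter_append]
          simp [hane]
        rw [hfa]
      · have hnil : ks.filter (fun k => init k == init x) = [] := by
          rw [List.filter_eq_nil_iff]
          intro k hk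
          simp only [beq_iff_eq]
          intro h
          apply hx
          rw [← h]
          exact List.mem_map_of_mem hk
        simp [List.filter_append, hnil]

-- ===== VERDICT (by name: the statement is the Claim_ definition above) =====
theorem count_same_last_name_initial_spec : Claim_equal_count_same_last_name_initial := by
  intro names _ _
  show count_same_last_name_initial names = count_same_last_name_initial_alt names
  unfold count_same_last_name_initial count_same_last_name_initial_alt
  rw [pv_fold_eq pvInitial (fun k => (((PySem.Dict.mk names).getD k []).length : Int))
    (names.map Prod.fst)]
  rfl
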